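-- pv_equiv track=rewrite | github.com/MinakamiMario/Cryptogem | scripts/build_tradeable_cache.py | filter_flatline
-- ===== SOURCE A (Python) =====
-- MAX_FLATLINE_STREAK = 20
--
-- def filter_flatline(candles):
--     """Filter 5: no extreme flatlines (identical close streak < 20)."""
--     if not candles:
--         return False, 0
--     max_streak = 1
--     streak = 1
--     for i in range(1, len(candles)):
--         if candles[i]["close"] == candles[i - 1]["close"]:
--             streak += 1
--             if streak > max_streak:
--                 max_streak = streak
--         else:
--             streak = 1
--     return max_streak < MAX_FLATLINE_STREAK, max_streak
-- ===== SOURCE B (Python) =====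
-- MAX_FLATLINE_STREAK = 20
--
-- def filter_flatline(candles):
--     """Filter 5: no extreme flatlines (identical close streak < 20)."""
--     if not candles:
--         return False, 0
--     closes = [c["close"] for c in candles]
--     n = len(closes)
--     # change-point decomposition: indices where the close changes, fenced by 0 and n;
--     # each maximal run of equal closes is exactly the gap between adjacent cut points
--     cuts = [0] + [i for i in range(1, n) if closes[i] != closes[i - 1]] + [n]
--     max_streak = max(b - a for a, b in zip(cuts, cuts[1:]))
--     return max_streak < MAX_FLATLINE_STREAK, max_streak
-- ===== Notes on version B (the rewrite author's own statement) =====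
-- stated objective: alternative
-- what changed: B has no streak counter at all: it computes the list of change-point indices (where close differs from its predecessor), fences it with 0 and n, and takes the maximum of adjacent differences of that cut list, instead of A's inline running streak/maximum state machine.
-- outside the precondition, e.g. on filter_flatline([{'x': 1}]): A returns (True, 1), B raises KeyError
import Mathlib
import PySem

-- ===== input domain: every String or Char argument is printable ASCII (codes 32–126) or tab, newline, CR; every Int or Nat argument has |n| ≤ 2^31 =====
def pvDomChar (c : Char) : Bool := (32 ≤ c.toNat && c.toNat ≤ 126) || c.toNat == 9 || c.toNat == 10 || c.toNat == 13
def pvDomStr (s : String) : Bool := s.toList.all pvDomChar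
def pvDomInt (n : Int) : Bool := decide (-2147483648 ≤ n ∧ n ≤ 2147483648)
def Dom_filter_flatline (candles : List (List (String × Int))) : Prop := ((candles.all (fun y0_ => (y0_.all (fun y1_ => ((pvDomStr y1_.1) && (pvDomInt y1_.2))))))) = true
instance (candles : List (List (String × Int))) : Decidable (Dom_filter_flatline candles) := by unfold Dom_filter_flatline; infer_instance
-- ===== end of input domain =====

-- B replaces A's running streak/maximum state machine by a change-point decomposition:
-- it lists the indices where the close changes, fences them with 0 and n, and takes the
-- maximum of adjacent differences of that cut list; same O(n) cost, different algorithm.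

-- ===== PORT A =====
-- candles[i]["close"]: first-match lookup in the association list (Python dict access)
def closeOf (c : List (String × Int)) : Int := (c.lookup "close").getD 0

def filter_flatline (candles : List (List (String × Int))) : Bool × Int :=
  if candles = [] then (false, 0)
  else
    let st := (PySem.List.pyRange 1 (candles.length : Int) 1).foldl
      (fun (st : Int × Int) (i : Int) =>
        if closeOf (PySem.List.pyGetD candles i []) = closeOf (PySem.List.pyGetD candles (i - 1) []) then
          (if st.2 + 1 > st.1 then (st.2 + 1, st.2 + 1) else (st.1, st.2 + 1))
        else (st.1, 1)) (1, 1)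
    (decide (st.1 < 20), st.1)

-- ===== PORT B =====
def filter_flatline_alt (candles : List (List (String × Int))) : Bool × Int :=
  if candles = [] then (false, 0)
  else
    let closes := candles.map closeOf
    let n : Int := (closes.length : Int)
    let cuts : List Int :=
      0 :: (PySem.List.pyRange 1 n 1).filter
              (fun i => decide (PySem.List.pyGetD closes i 0 ≠ PySem.List.pyGetD closes (i - 1) 0)) ++ [n]
    -- max(b - a for a, b in zip(cuts, cuts[1:])); the default 0 is unreachable: cuts has ≥ 2 elements
    let ms : Int := (PySem.List.max? ((cuts.zip (PySem.List.slice cuts (some 1) none)).map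
                (fun p => p.2 - p.1)) (fun x => x)).getD 0
    (decide (ms < 20), ms)

-- ===== PRECONDITION & SPEC =====
-- Pre_ excludes candle lists in which some candle lacks the "close" key: on those Python A
-- raises KeyError, except the untouched single-element list, where A returns (True, 1) only
-- because its loop never indexes the candle (B raises KeyError on any missing "close").
def Pre_filter_flatline (candles : List (List (String × Int))) : Prop :=
  (candles.all (fun c => c.any (fun p => p.1.toList == "close".toList))) = true
instance (candles : List (List (String × Int))) : Decidable (Pre_filter_flatline candles) := by
  unfold Pre_filter_flatline; infer_instance

def pvWitness_filter_flatline : (List (List (String × Int))) :=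
  [[("close", 5)], [("close", 5)], [("close", 7)]]

def Spec_filter_flatline (candles : List (List (String × Int))) (out : Bool × Int) : Prop := out = filter_flatline_alt candles
instance (candles : List (List (String × Int))) (out : Bool × Int) : Decidable (Spec_filter_flatline candles out) := by unfold Spec_filter_flatline; infer_instance

-- ===== CLAIM (what is proved, stated in full; the proofs are below) =====
def Claim_equal_filter_flatline : Prop := ∀ (candles : List (List (String × Int))), Dom_filter_flatline candles → Pre_filter_flatline candles → Spec_filter_flatline candles (filter_flatline candles)

-- ===== LEMMAS AND PROOFS =====

-- A's loop body, named so the proof can rewrite one step at a time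
def stepA (cs : List Int) (st : Int × Int) (i : Int) : Int × Int :=
  if PySem.List.pyGetD cs i 0 = PySem.List.pyGetD cs (i - 1) 0 then
    (if st.2 + 1 > st.1 then (st.2 + 1, st.2 + 1) else (st.1, st.2 + 1))
  else (st.1, 1)

-- running maximum of the adjacent differences of (a :: l), folded into m
def gmAux : Int → Int → List Int → Int
  | _, m, [] => m
  | a, m, b :: r => gmAux b (max m (b - a)) r

theorem gmAux_absorb (a m x : Int) (b : Int) (r : List Int) (h : x ≤ b - a) :
    gmAux a (max m x) (b :: r) = gmAux a m (b :: r) := by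
  show gmAux b (max (max m x) (b - a)) r = gmAux b (max m (b - a)) r
  congr 1
  omega

-- A's streak loop over indices j+1 .. n-1 equals the max of the gaps between the
-- remaining change points (fenced by the current run start lc and n), folded into ms
theorem loopA_eq_gaps (cs : List Int) : ∀ (k j : Nat) (lc ms s : Int),
    j < cs.length → cs.length - (j + 1) = k → 0 ≤ lc → lc ≤ (j : Int) →
    s = (j : Int) - lc + 1 → s ≤ ms →
    ((PySem.List.pyRange ((j : Int) + 1) (cs.length : Int) 1).foldl (stepA cs) (ms, s)).1
    = gmAux lc ms
        (((PySem.List.pyRange ((j : Int) + 1) (cs.length : Int) 1).filter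
            (fun i => decide (PySem.List.pyGetD cs i 0 ≠ PySem.List.pyGetD cs (i - 1) 0))) ++ [(cs.length : Int)]) := by
  intro k
  induction k with
  | zero =>
    intro j lc ms s hj hk hlc0 hlcj hs hms
    rw [PySem.List.pyRange_one_eq_nil (by omega)]
    simp only [List.foldl_nil, List.filter_nil, List.nil_append]
    show ms = max ms ((cs.length : Int) - lc)
    omega
  | succ k ih =>
    intro j lc ms s hj hk hlc0 hlcj hs hms
    have hj1 : j + 1 < cs.length := by omega
    rw [PySem.List.pyRange_one_cons (by omega)]
    rw [List.foldl_cons, List.filter_cons]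
    have hhead : ∀ x ∈ (PySem.List.pyRange ((j : Int) + 1 + 1) (cs.length : Int) 1).filter
        (fun i => decide (PySem.List.pyGetD cs i 0 ≠ PySem.List.pyGetD cs (i - 1) 0)) ++ [(cs.length : Int)],
        (j : Int) + 2 ≤ x := by
      intro x hx
      rcases List.mem_append.mp hx with hx | hx
      · have := (PySem.List.mem_pyRange_one.mp (List.mem_of_mem_filter hx)).1
        omega
      · simp at hx; subst hx; omega
    by_cases h : PySem.List.pyGetD cs ((j : Int) + 1) 0 = PySem.List.pyGetD cs ((j : Int) + 1 - 1) 0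
    · have hstep : stepA cs (ms, s) ((j : Int) + 1) = (max ms (s + 1), s + 1) := by
        simp only [stepA, if_pos h]
        split_ifs <;> simp [Prod.ext_iff] <;> omega
      rw [hstep]
      have ihj := ih (j + 1) lc (max ms (s + 1)) (s + 1) hj1 (by omega) hlc0
        (by push_cast; omega) (by push_cast; omega) (le_max_right _ _)
      push_cast at ihj
      rw [ihj]
      rw [if_neg (by simpa using h)]
      rcases hl : (PySem.List.pyRange ((j : Int) + 1 + 1) (cs.length : Int) 1).filter
          (fun i => decide (PySem.List.pyGetD cs i 0 ≠ PySem.List.pyGetD cs (i - 1) 0)) ++ [(cs.length : Int)]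
        with _ | ⟨b, r⟩
      · exact absurd hl (by simp)
      · refine gmAux_absorb lc ms _ b r ?_
        have := hhead b (by rw [hl]; exact List.mem_cons_self ..)
        omega
    · have hstep : stepA cs (ms, s) ((j : Int) + 1) = (ms, 1) := by
        simp only [stepA, if_neg h]
      rw [hstep]
      have ihj := ih (j + 1) ((j : Int) + 1) ms 1 hj1 (by omega) (by omega)
        (by push_cast; omega) (by push_cast; ring) (by omega)
      push_cast at ihj
      rw [ihj]
      rw [if_pos (by simpa using h)]
      show gmAux ((j : Int) + 1) ms _ = gmAux ((j : Int) + 1) (max ms ((j : Int) + 1 - lc)) _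
      congr 1
      omega

-- the Python max over adjacent differences of (b :: r), seeded with m, is gmAux
theorem foldl_diffs_eq_gmAux (r : List Int) : ∀ (b m : Int),
    (((b :: r).zip r).map (fun p => p.2 - p.1)).foldl max m = gmAux b m r := by
  induction r with
  | nil => intro b m; rfl
  | cons c r' ih =>
    intro b m
    show ((((c :: r').zip r').map (fun p => p.2 - p.1))).foldl max (max m (c - b)) = _
    rw [ih c (max m (c - b))]
    rfl

-- ===== VERDICT (by name: the statement is the Claim_ definition above) =====
theorem filter_flatline_spec : Claim_equal_filter_flatline := by
  intro candles _hdom _hpre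
  unfold Spec_filter_flatline
  by_cases hnil : candles = []
  · simp [filter_flatline, filter_flatline_alt, hnil]
  · have hlen0 : 0 < (candles.map closeOf).length := by
      simpa using List.length_pos_of_ne_nil (by simpa using hnil : candles.map closeOf ≠ [])
    -- A's loop body, rewritten over the list of closes
    have hfun : (fun (st : Int × Int) (i : Int) =>
        if closeOf (PySem.List.pyGetD candles i []) = closeOf (PySem.List.pyGetD candles (i - 1) []) then
          (if st.2 + 1 > st.1 then (st.2 + 1, st.2 + 1) else (st.1, st.2 + 1))
        else (st.1, 1)) = stepA (candles.map closeOf) := by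
      funext st i
      show _ = stepA (candles.map closeOf) st i
      unfold stepA
      rw [show (0 : Int) = closeOf [] from rfl]
      rw [PySem.List.pyGetD_map closeOf candles i [], PySem.List.pyGetD_map closeOf candles (i - 1) []]
    have hlen : (candles.length : Int) = ((candles.map closeOf).length : Int) := by simp
    set cs := candles.map closeOf with hcs
    have hA := loopA_eq_gaps cs (cs.length - 1) 0 0 1 1 hlen0 (by omega) le_rfl
      (by simp) (by simp) le_rfl
    simp only [Nat.cast_zero, zero_add] at hA
    rcases hM : ((PySem.List.pyRange 1 (cs.length : Int) 1).filter
        (fun i => decide (PySem.List.pyGetD cs i 0 ≠ PySem.List.pyGetD cs (i - 1) 0))) ++ [(cs.length : Int)]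
      with _ | ⟨b, r⟩
    · exact absurd hM (by simp)
    · have hb1 : 1 ≤ b := by
        have hmem : b ∈ ((PySem.List.pyRange 1 (cs.length : Int) 1).filter
            (fun i => decide (PySem.List.pyGetD cs i 0 ≠ PySem.List.pyGetD cs (i - 1) 0))) ++ [(cs.length : Int)] := by
          rw [hM]; exact List.mem_cons_self ..
        rcases List.mem_append.mp hmem with hx | hx
        · exact (PySem.List.mem_pyRange_one.mp (List.mem_of_mem_filter hx)).1
        · simp at hx; subst hx; exact_mod_cast hlen0
      have hBms : (PySem.List.max? (((0 :: b :: r).zip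
            (PySem.List.slice (0 :: b :: r) (some 1) none)).map (fun p => p.2 - p.1)) (fun x => x)).getD 0
          = gmAux 0 1 (b :: r) := by
        rw [PySem.List.slice_from_one]
        show (PySem.List.max? ((b - 0) :: ((b :: r).zip r).map (fun p => p.2 - p.1)) (fun x => x)).getD 0 = _
        rw [PySem.List.max?_id_cons]
        show (((b :: r).zip r).map (fun p => p.2 - p.1)).foldl max (b - 0) = _
        rw [foldl_diffs_eq_gmAux]
        show gmAux b (b - 0) r = gmAux b (max 1 (b - 0)) r
        congr 1; omega
      simp only [filter_flatline, filter_flatline_alt, if_neg hnil]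
      rw [hfun, hlen, ← hcs, hA]
      simp only [List.cons_append]
      simp only [hM, hBms]
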